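-- pv_equiv track=rewrite | github.com/bagger3025/ps_everyday | codeforces/2152_Squarepoint_Challenge_Round_1055_Div12/testcase/e/test.py | get_skyscrape
-- ===== SOURCE A (Python) =====
-- from typing import List
--
-- def get_skyscrape(idx_list: List[int], answer_list: List[int]) -> List[int]:
--     ans = [idx_list[0]]
--     maxval = answer_list[idx_list[0] - 1]
--     for idx in idx_list[1:]:
--         if answer_list[idx - 1] > maxval:
--             maxval = answer_list[idx - 1]
--             ans.append(idx)
--
--     return ans
-- ===== SOURCE B (Python) =====
-- from typing import List
--
-- def get_skyscrape(idx_list: List[int], answer_list: List[int]) -> List[int]: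
--     res = [idx_list[0]]
--     prefix = idx_list[:1]
--     for idx in idx_list[1:]:
--         if answer_list[idx - 1] > max(answer_list[i - 1] for i in prefix):
--             res.append(idx)
--         prefix.append(idx)
--     return res
-- ===== Notes on version B (the rewrite author's own statement) =====
-- stated objective: alternative
-- what changed: Drops A's running-max state entirely: B keeps the list of already-seen indices and decides each element by a stateless brute-force rescan, recomputing max over the whole prefix (nested scans, O(n^2)) instead of maintaining a scalar maximum in one O(n) pass.
import Mathlib
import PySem

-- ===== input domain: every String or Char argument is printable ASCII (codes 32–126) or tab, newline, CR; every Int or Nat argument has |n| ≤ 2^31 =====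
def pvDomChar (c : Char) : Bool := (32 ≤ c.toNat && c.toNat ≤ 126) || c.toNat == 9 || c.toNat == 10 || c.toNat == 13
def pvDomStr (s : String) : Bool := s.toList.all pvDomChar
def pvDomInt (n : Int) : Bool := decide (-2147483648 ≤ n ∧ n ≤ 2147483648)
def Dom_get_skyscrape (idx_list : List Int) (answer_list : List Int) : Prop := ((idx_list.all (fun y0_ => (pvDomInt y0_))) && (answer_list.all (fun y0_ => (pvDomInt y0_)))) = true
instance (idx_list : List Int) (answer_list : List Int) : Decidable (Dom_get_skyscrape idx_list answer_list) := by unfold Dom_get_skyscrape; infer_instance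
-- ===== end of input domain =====

-- B drops A's running-max state: it keeps the list of already-seen indices and decides each
-- element by recomputing the max over that whole prefix (stateless nested rescan, O(n^2)).
-- ===== PORT A =====
def get_skyscrape (idx_list : List Int) (answer_list : List Int) : List Int :=
  let first := (PySem.List.pyGet? idx_list 0).getD 0
  let ans : List Int := [first]
  let maxval := (PySem.List.pyGet? answer_list (first - 1)).getD 0
  ((PySem.List.slice idx_list (some 1) none).foldl
    (fun (st : List Int × Int) idx =>
      if (PySem.List.pyGet? answer_list (idx - 1)).getD 0 > st.2 then
        (st.1 ++ [idx], (PySem.List.pyGet? answer_list (idx - 1)).getD 0)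
      else st)
    (ans, maxval)).1

-- ===== PORT B =====
def get_skyscrape_alt (idx_list : List Int) (answer_list : List Int) : List Int :=
  let res : List Int := [(PySem.List.pyGet? idx_list 0).getD 0]
  let pre : List Int := PySem.List.slice idx_list none (some 1)
  ((PySem.List.slice idx_list (some 1) none).foldl
    (fun (st : List Int × List Int) idx =>
      ((if (PySem.List.pyGet? answer_list (idx - 1)).getD 0 >
            (PySem.List.max? (st.2.map (fun i => (PySem.List.pyGet? answer_list (i - 1)).getD 0))
              (fun y => y)).getD 0
        then st.1 ++ [idx] else st.1),
       st.2 ++ [idx]))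
    (res, pre)).1

-- ===== PRECONDITION & SPEC =====
-- Pre_: the Python A raises IndexError on an empty idx_list and whenever some answer_list[i-1] access is out of range.
def Pre_get_skyscrape (idx_list : List Int) (answer_list : List Int) : Prop :=
  idx_list ≠ [] ∧ ∀ i ∈ idx_list, PySem.Raise.InRange answer_list.length (i - 1)
instance (idx_list : List Int) (answer_list : List Int) : Decidable (Pre_get_skyscrape idx_list answer_list) := by unfold Pre_get_skyscrape; infer_instance
def pvWitness_get_skyscrape : List Int × List Int := ([1, 2, 1], [3, 1])
def Spec_get_skyscrape (idx_list : List Int) (answer_list : List Int) (out : List Int) : Prop := out = get_skyscrape_alt idx_list answer_list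
instance (idx_list : List Int) (answer_list : List Int) (out : List Int) : Decidable (Spec_get_skyscrape idx_list answer_list out) := by unfold Spec_get_skyscrape; infer_instance

-- ===== CLAIM (what is proved, stated in full; the proofs are below) =====
def Claim_equal_get_skyscrape : Prop := ∀ (idx_list : List Int) (answer_list : List Int), Dom_get_skyscrape idx_list answer_list → Pre_get_skyscrape idx_list answer_list → Spec_get_skyscrape idx_list answer_list (get_skyscrape idx_list answer_list)

-- ===== LEMMAS AND PROOFS =====

-- recursive description of A's loop: keep i when its value strictly exceeds the running max
def goSky (f : Int → Int) (m : Int) : List Int → List Int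
  | [] => []
  | i :: is => if f i > m then i :: goSky f (f i) is else goSky f m is

theorem foldA_eq_goSky (f : Int → Int) :
    ∀ (is ans : List Int) (m : Int),
      (is.foldl (fun (st : List Int × Int) idx =>
          if f idx > st.2 then (st.1 ++ [idx], f idx) else st) (ans, m)).1
        = ans ++ goSky f m is := by
  intro is
  induction is with
  | nil => intro ans m; simp [goSky]
  | cons i is ih =>
    intro ans m
    by_cases h : f i > m
    · simp [goSky, h, ih]
    · simp [goSky, h, ih]

-- max over a mapped nonempty prefix, as B computes it
def maxOf (f : Int → Int) (pre : List Int) : Int :=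
  (PySem.List.max? (pre.map f) (fun y => y)).getD 0

theorem maxOf_cons (f : Int → Int) (p : Int) (ps : List Int) :
    maxOf f (p :: ps) = (ps.map f).foldl max (f p) := by
  simp [maxOf, PySem.List.max?_id_cons]

theorem maxOf_append (f : Int → Int) (p i : Int) (ps : List Int) :
    maxOf f ((p :: ps) ++ [i]) = max (maxOf f (p :: ps)) (f i) := by
  simp [maxOf_cons, List.foldl_append]

theorem foldB_eq_goSky (f : Int → Int) :
    ∀ (is res : List Int) (p : Int) (ps : List Int),
      (is.foldl (fun (st : List Int × List Int) idx =>
          ((if f idx > maxOf f st.2 then st.1 ++ [idx] else st.1), st.2 ++ [idx]))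
        (res, p :: ps)).1
        = res ++ goSky f (maxOf f (p :: ps)) is := by
  intro is
  induction is with
  | nil => intro res p ps; simp [goSky]
  | cons i is ih =>
    intro res p ps
    by_cases h : f i > maxOf f (p :: ps)
    · have hm : maxOf f ((p :: ps) ++ [i]) = f i := by
        rw [maxOf_append]; omega
      simp only [List.foldl_cons, if_pos h]
      rw [show (p :: ps) ++ [i] = p :: (ps ++ [i]) from rfl] at hm ⊢
      rw [ih (res ++ [i]) p (ps ++ [i]), hm]
      simp [goSky, h]
    · have hm : maxOf f ((p :: ps) ++ [i]) = maxOf f (p :: ps) := by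
        rw [maxOf_append]; omega
      simp only [List.foldl_cons, if_neg h]
      rw [show (p :: ps) ++ [i] = p :: (ps ++ [i]) from rfl] at hm ⊢
      rw [ih res p (ps ++ [i]), hm]
      simp [goSky, h]

-- ===== VERDICT (by name: the statement is the Claim_ definition above) =====
theorem get_skyscrape_spec : Claim_equal_get_skyscrape := by
  intro idx_list answer_list _ _
  unfold Spec_get_skyscrape get_skyscrape get_skyscrape_alt
  cases idx_list with
  | nil => simp [PySem.List.slice]
  | cons i0 is =>
    simp only [PySem.List.slice_from_one, PySem.List.pyGet?_zero_cons, Option.getD_some,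
      List.tail_cons]
    set f : Int → Int := fun i => (PySem.List.pyGet? answer_list (i - 1)).getD 0 with hf
    have hsl : PySem.List.slice (i0 :: is) none (some 1) = [i0] := by
      simp [PySem.List.slice_to]
    rw [hsl]
    rw [foldA_eq_goSky f is [i0] (f i0)]
    have : (fun (st : List Int × List Int) idx =>
        ((if f idx > (PySem.List.max? (st.2.map f) (fun y => y)).getD 0
          then st.1 ++ [idx] else st.1), st.2 ++ [idx]))
      = (fun (st : List Int × List Int) idx =>
        ((if f idx > maxOf f st.2 then st.1 ++ [idx] else st.1), st.2 ++ [idx])) := by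
      funext st idx; simp [maxOf]
    rw [this, foldB_eq_goSky f is [i0] i0 []]
    have hm0 : maxOf f [i0] = f i0 := by simp [maxOf_cons]
    rw [hm0]
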